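-- pv_equiv track=rewrite | github.com/mission-engadi/content-service | app/core/languages.py | get_missing_languages
-- ===== SOURCE A (Python) =====
-- SUPPORTED_LANGUAGES = ["en", "es", "fr", "pt-br"]
--
-- def get_missing_languages(
--     available_languages: list[str],
--     include_all: bool = True
-- ) -> list[str]:
--     """Get list of missing languages for content.
--
--     Args:
--         available_languages: List of languages already available
--         include_all: If True, return all supported languages. If False, exclude 'en'
--
--     Returns:
--         List of missing language codes
--     """
--     available_set = set(lang.lower().strip() for lang in available_languages)
--
--     if include_all:
--         supported = set(SUPPORTED_LANGUAGES)
--     else: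
--         # Exclude English as it's typically the original language
--         supported = set(lang for lang in SUPPORTED_LANGUAGES if lang != "en")
--
--     missing = supported - available_set
--     return sorted(list(missing))
-- ===== SOURCE B (Python) =====
-- SUPPORTED_LANGUAGES = ["en", "es", "fr", "pt-br"]
--
-- def get_missing_languages(
--     available_languages: list[str],
--     include_all: bool = True
-- ) -> list[str]:
--     # Start from the ordered candidate list and delete each available language.
--     missing = list(SUPPORTED_LANGUAGES) if include_all \
--         else [lang for lang in SUPPORTED_LANGUAGES if lang != "en"]
--     for lang in available_languages:
--         norm = lang.lower().strip()
--         if norm in missing: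
--             missing.remove(norm)
--     return missing
-- ===== Notes on version B (the rewrite author's own statement) =====
-- stated objective: alternative
-- what changed: Instead of building a normalized set, taking a set difference and sorting it, B starts from the ordered candidate list of supported languages and folds over available_languages, deleting each normalized language from that list in place; no set and no sort are used, relying on SUPPORTED_LANGUAGES already being sorted.
import Mathlib
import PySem

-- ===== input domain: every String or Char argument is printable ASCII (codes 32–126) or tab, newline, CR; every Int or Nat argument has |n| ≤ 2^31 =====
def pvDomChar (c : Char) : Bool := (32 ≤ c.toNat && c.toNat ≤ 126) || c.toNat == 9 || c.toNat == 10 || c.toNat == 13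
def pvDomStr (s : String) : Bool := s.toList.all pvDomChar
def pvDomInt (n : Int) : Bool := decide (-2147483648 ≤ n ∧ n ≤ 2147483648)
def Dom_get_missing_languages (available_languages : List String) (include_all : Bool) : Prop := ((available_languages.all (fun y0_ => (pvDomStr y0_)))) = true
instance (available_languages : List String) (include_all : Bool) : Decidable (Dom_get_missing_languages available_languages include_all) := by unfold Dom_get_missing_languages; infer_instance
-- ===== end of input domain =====

-- B replaces A's set-difference-then-sort by a deletion fold: start from the ordered
-- candidate list and remove each normalized available language from it; no set, no sort.

-- module constant SUPPORTED_LANGUAGES (shared by both ports)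
def SUPPORTED_LANGUAGES : List String := ["en", "es", "fr", "pt-br"]

-- ===== PORT A =====
def get_missing_languages (available_languages : List String) (include_all : Bool) : List String :=
  let available_set : PySem.Set String :=
    PySem.Set.ofList (available_languages.map (fun lang => PySem.Str.strip (PySem.Str.lower lang)))
  let supported : PySem.Set String :=
    if include_all then PySem.Set.ofList SUPPORTED_LANGUAGES
    else PySem.Set.ofList (SUPPORTED_LANGUAGES.filter (fun lang => lang != "en"))
  PySem.List.sorted (PySem.Set.diff supported available_set) (fun x => x) false

-- ===== PORT B =====
def get_missing_languages_alt (available_languages : List String) (include_all : Bool) : List String :=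
  let init : List String :=
    if include_all then SUPPORTED_LANGUAGES
    else SUPPORTED_LANGUAGES.filter (fun lang => lang != "en")
  available_languages.foldl
    (fun missing lang =>
      let norm := PySem.Str.strip (PySem.Str.lower lang)
      if norm ∈ missing then missing.erase norm else missing)
    init

-- ===== PRECONDITION & SPEC =====
def Spec_get_missing_languages (available_languages : List String) (include_all : Bool) (out : List String) : Prop := out = get_missing_languages_alt available_languages include_all
instance (available_languages : List String) (include_all : Bool) (out : List String) : Decidable (Spec_get_missing_languages available_languages include_all out) := by unfold Spec_get_missing_languages; infer_instance

-- ===== CLAIM (what is proved, stated in full; the proofs are below) =====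
def Claim_equal_get_missing_languages : Prop := ∀ (available_languages : List String) (include_all : Bool), Dom_get_missing_languages available_languages include_all → Spec_get_missing_languages available_languages include_all (get_missing_languages available_languages include_all)

-- ===== LEMMAS AND PROOFS =====

-- one deletion step on a duplicate-free list is a filter
theorem pv_step (m : List String) (hm : m.Nodup) (n : String) :
    (if n ∈ m then m.erase n else m) = m.filter (fun x => x ≠ n) := by
  by_cases h : n ∈ m
  · rw [if_pos h, List.Nodup.erase_eq_filter hm]
    apply List.filter_congr; intro x _; by_cases hx : x = n <;> simp [hx]
  · rw [if_neg h]
    exact (List.filter_eq_self.mpr (by intro a ha; simp; rintro rfl; exact h ha)).symm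

-- the whole fold is a filter by non-membership in the normalized available list
theorem pv_fold (norm : String → String) (avail : List String) :
    ∀ (m : List String), m.Nodup →
    avail.foldl (fun missing lang =>
        if norm lang ∈ missing then missing.erase (norm lang) else missing) m
      = m.filter (fun x => x ∉ avail.map norm) := by
  induction avail with
  | nil => intro m _; simp
  | cons a rest ih =>
      intro m hm
      have h1 : (if norm a ∈ m then m.erase (norm a) else m)
          = m.filter (fun x => x ≠ norm a) := pv_step m hm (norm a)
      simp only [List.foldl_cons, h1]
      rw [ih _ (hm.filter _), List.filter_filter]
      apply List.filter_congr
      intro x _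
      by_cases hx : x = norm a <;> simp [hx, Bool.and_comm]

-- A's sorted set-difference is the same filter, by case analysis on the four languages
theorem pv_core (S : List String) (include_all : Bool) :
    PySem.List.sorted
      (PySem.Set.diff
        (if include_all then PySem.Set.ofList SUPPORTED_LANGUAGES
         else PySem.Set.ofList (SUPPORTED_LANGUAGES.filter (fun lang => lang != "en"))) S)
      (fun x => x) false
    = (if include_all then SUPPORTED_LANGUAGES
       else SUPPORTED_LANGUAGES.filter (fun lang => lang != "en")).filter
        (fun x => x ∉ S) := by
  cases include_all <;>
    by_cases h1 : ("en" : String) ∈ S <;>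
    by_cases h2 : ("es" : String) ∈ S <;>
    by_cases h3 : ("fr" : String) ∈ S <;>
    by_cases h4 : ("pt-br" : String) ∈ S <;>
    simp [SUPPORTED_LANGUAGES, PySem.Set.diff, PySem.Set.ofList, PySem.Set.add,
      PySem.Set.empty, PySem.Set.contains, List.filter, h1, h2, h3, h4] <;>
    exact PySem.List.sorted_eq_self_of_pairwise _ _
      (by first | decide | (simp [String.le_iff_toList_le]; decide))

-- ===== VERDICT (by name: the statement is the Claim_ definition above) =====
theorem get_missing_languages_spec : Claim_equal_get_missing_languages := by
  intro avail include_all _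
  simp only [Spec_get_missing_languages, get_missing_languages, get_missing_languages_alt]
  rw [pv_fold (fun lang => PySem.Str.strip (PySem.Str.lower lang)) avail _
        (by cases include_all <;> decide)]
  refine (pv_core _ include_all).trans ?_
  exact List.filter_congr (by intro x _; simp [PySem.Set.mem_ofList])
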